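-- pv_equiv track=rewrite | github.com/Avikalp-Karrahe/Hack-night-Github-Oct1-2025 | agents/weaviate_analyzer.py | _detect_api_patterns
-- ===== SOURCE A (Python) =====
-- def _detect_api_patterns(repo_data):
--     """Detect API patterns in the repository."""
--     files = repo_data.get('files', {})
--     patterns = []
--
--     if any('api' in f.lower() for f in files):
--         patterns.append("REST API")
--     if any('graphql' in f.lower() for f in files):
--         patterns.append("GraphQL")
--     if any('websocket' in f.lower() for f in files):
--         patterns.append("WebSocket")
--
--     return patterns
-- ===== SOURCE B (Python) =====
-- def _detect_api_patterns(repo_data):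
--     """Detect API patterns in the repository (single pass with flags)."""
--     files = repo_data.get('files', {})
--     api = gql = ws = False
--     for f in files:
--         fl = f.lower()
--         api = api or 'api' in fl
--         gql = gql or 'graphql' in fl
--         ws = ws or 'websocket' in fl
--         if api and gql and ws:
--             break
--     patterns = []
--     if api:
--         patterns.append("REST API")
--     if gql:
--         patterns.append("GraphQL")
--     if ws:
--         patterns.append("WebSocket")
--     return patterns
-- ===== Notes on version B (the rewrite author's own statement) =====
-- stated objective: alternative
-- what changed: Replaces three separate any() scans over the file names with one single pass that maintains three boolean flags (lowercasing each name once) and breaks early when all three are set, appending the pattern labels afterwards in the fixed order.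
import Mathlib
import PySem

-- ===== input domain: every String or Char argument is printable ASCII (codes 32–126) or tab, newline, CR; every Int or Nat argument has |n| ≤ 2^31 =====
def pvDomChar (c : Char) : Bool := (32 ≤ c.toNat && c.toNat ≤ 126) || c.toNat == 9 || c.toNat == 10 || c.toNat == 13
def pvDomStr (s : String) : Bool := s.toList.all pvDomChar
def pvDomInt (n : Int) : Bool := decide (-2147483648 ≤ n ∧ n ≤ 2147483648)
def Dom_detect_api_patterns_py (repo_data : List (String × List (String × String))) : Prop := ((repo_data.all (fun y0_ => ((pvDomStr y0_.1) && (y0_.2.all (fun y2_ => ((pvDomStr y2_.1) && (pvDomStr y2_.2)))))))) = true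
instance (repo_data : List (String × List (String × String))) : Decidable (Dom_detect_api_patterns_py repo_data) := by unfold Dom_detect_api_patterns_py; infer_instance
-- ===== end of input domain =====

-- B fuses A's three any() scans into ONE pass with three boolean flags and an early break; same result, output order fixed by the final appends.

-- shared helper: repo_data.get('files', {}) — first-match lookup in the association list
def pvGetFiles : List (String × List (String × String)) → List (String × String)
  | [] => []
  | (k, v) :: rest => if k == "files" then v else pvGetFiles rest

-- ===== PORT A =====
def detect_api_patterns_py (repo_data : List (String × List (String × String))) : List String :=
  let files := pvGetFiles repo_data
  let patterns : List String := []
  let patterns := if files.any (fun f => PySem.Str.isIn "api" (PySem.Str.lower f.1)) then patterns ++ ["REST API"] else patterns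
  let patterns := if files.any (fun f => PySem.Str.isIn "graphql" (PySem.Str.lower f.1)) then patterns ++ ["GraphQL"] else patterns
  let patterns := if files.any (fun f => PySem.Str.isIn "websocket" (PySem.Str.lower f.1)) then patterns ++ ["WebSocket"] else patterns
  patterns

-- ===== PORT B =====
-- B's loop: one pass over the file names, three flags, early break once all are set
def pvScanFlags : List (String × String) → Bool → Bool → Bool → Bool × Bool × Bool
  | [], api, gql, ws => (api, gql, ws)
  | f :: rest, api, gql, ws =>
    let fl := PySem.Str.lower f.1
    let api' := api || PySem.Str.isIn "api" fl
    let gql' := gql || PySem.Str.isIn "graphql" fl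
    let ws' := ws || PySem.Str.isIn "websocket" fl
    if api' && gql' && ws' then (api', gql', ws')
    else pvScanFlags rest api' gql' ws'

def detect_api_patterns_py_alt (repo_data : List (String × List (String × String))) : List String :=
  let files := pvGetFiles repo_data
  let (api, gql, ws) := pvScanFlags files false false false
  (if api then ["REST API"] else []) ++ (if gql then ["GraphQL"] else []) ++ (if ws then ["WebSocket"] else [])

-- ===== PRECONDITION & SPEC =====
def Spec_detect_api_patterns_py (repo_data : List (String × List (String × String))) (out : List String) : Prop := out = detect_api_patterns_py_alt repo_data
instance (repo_data : List (String × List (String × String))) (out : List String) : Decidable (Spec_detect_api_patterns_py repo_data out) := by unfold Spec_detect_api_patterns_py; infer_instance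

-- ===== CLAIM (what is proved, stated in full; the proofs are below) =====
def Claim_equal_detect_api_patterns_py : Prop := ∀ (repo_data : List (String × List (String × String))), Dom_detect_api_patterns_py repo_data → Spec_detect_api_patterns_py repo_data (detect_api_patterns_py repo_data)

-- ===== LEMMAS AND PROOFS =====

-- B's early-break flag loop computes exactly the three any() results, each seeded with the incoming flag
theorem pvScanFlags_eq (xs : List (String × String)) (a g w : Bool) :
    pvScanFlags xs a g w =
      (a || xs.any (fun f => PySem.Str.isIn "api" (PySem.Str.lower f.1)),
       g || xs.any (fun f => PySem.Str.isIn "graphql" (PySem.Str.lower f.1)),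
       w || xs.any (fun f => PySem.Str.isIn "websocket" (PySem.Str.lower f.1))) := by
  induction xs generalizing a g w with
  | nil => simp [pvScanFlags]
  | cons f rest ih =>
    simp only [pvScanFlags]
    split
    · rename_i h
      simp only [Bool.and_eq_true] at h
      obtain ⟨⟨ha, hg⟩, hw⟩ := h
      simp only [List.any_cons]
      rw [← Bool.or_assoc, ← Bool.or_assoc, ← Bool.or_assoc, ha, hg, hw]
      simp
    · rw [ih]
      simp [Bool.or_assoc]

theorem detect_api_patterns_py_spec : Claim_equal_detect_api_patterns_py := by
  intro repo_data _
  show _ = _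
  simp only [detect_api_patterns_py, detect_api_patterns_py_alt, pvScanFlags_eq, Bool.false_or]
  cases h1 : (pvGetFiles repo_data).any (fun f => PySem.Str.isIn "api" (PySem.Str.lower f.1)) <;>
  cases h2 : (pvGetFiles repo_data).any (fun f => PySem.Str.isIn "graphql" (PySem.Str.lower f.1)) <;>
  cases h3 : (pvGetFiles repo_data).any (fun f => PySem.Str.isIn "websocket" (PySem.Str.lower f.1)) <;>
  simp [h1, h2, h3]
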